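-- pv_equiv track=rewrite | github.com/hamzasrepo/4th_Session_with_Khazar | love_calculator.py | calculate_love_score
-- ===== SOURCE A (Python) =====
-- def calculate_love_score(name1, name2):
--     combined_name = name1 + name2
--
--     count_of_true = 0
--     count_of_love = 0
--
--     for letter in "true":
--         count_of_true = count_of_true + combined_name.count(letter)
--
--     for letter in "love":
--         count_of_love = count_of_love + combined_name.count(letter)
--
--     love_score = f"{count_of_true}{count_of_love}"
--     return love_score
-- ===== SOURCE B (Python) =====
-- def calculate_love_score(name1, name2):
--     combined_name = name1 + name2
--     count_of_true = 0
--     count_of_love = 0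
--     for ch in combined_name:
--         if ch in "true":
--             count_of_true += 1
--         if ch in "love":
--             count_of_love += 1
--     return f"{count_of_true}{count_of_love}"
-- ===== Notes on version B (the rewrite author's own statement) =====
-- stated objective: idiomatic
-- what changed: Replaces A's eight full scans of the combined string (one .count call per pattern letter) by a single pass over the string that tests each character for membership in "true" and "love" and bumps two accumulators.
import Mathlib
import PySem

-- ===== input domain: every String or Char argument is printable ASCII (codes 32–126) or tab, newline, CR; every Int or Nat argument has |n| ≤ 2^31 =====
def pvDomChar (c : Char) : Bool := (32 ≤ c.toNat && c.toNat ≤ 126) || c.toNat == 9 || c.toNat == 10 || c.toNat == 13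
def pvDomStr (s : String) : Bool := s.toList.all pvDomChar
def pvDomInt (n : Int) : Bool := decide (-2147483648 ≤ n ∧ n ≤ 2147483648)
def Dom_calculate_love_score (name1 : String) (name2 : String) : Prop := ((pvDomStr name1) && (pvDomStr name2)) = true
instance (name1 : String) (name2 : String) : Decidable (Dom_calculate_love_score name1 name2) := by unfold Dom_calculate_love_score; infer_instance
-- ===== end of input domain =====

-- B replaces A's eight full scans (one str.count per pattern letter) by one pass with two accumulators (idiomatic).

-- ===== PORT A =====
def calculate_love_score (name1 : String) (name2 : String) : String :=
  let combined_name := name1 ++ name2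
  let count_of_true : Int :=
    "true".toList.foldl (fun acc letter => acc + (PySem.Str.count combined_name (String.singleton letter) : Int)) 0
  let count_of_love : Int :=
    "love".toList.foldl (fun acc letter => acc + (PySem.Str.count combined_name (String.singleton letter) : Int)) 0
  PySem.Int.toStr count_of_true ++ PySem.Int.toStr count_of_love

-- ===== PORT B =====
def calculate_love_score_alt (name1 : String) (name2 : String) : String :=
  let combined_name := name1 ++ name2
  let counts : Int × Int :=
    combined_name.toList.foldl
      (fun p ch =>
        ((if PySem.Str.isIn (String.singleton ch) "true" then p.1 + 1 else p.1),
         (if PySem.Str.isIn (String.singleton ch) "love" then p.2 + 1 else p.2)))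
      (0, 0)
  PySem.Int.toStr counts.1 ++ PySem.Int.toStr counts.2

-- ===== PRECONDITION & SPEC =====
def Spec_calculate_love_score (name1 : String) (name2 : String) (out : String) : Prop := out = calculate_love_score_alt name1 name2
instance (name1 : String) (name2 : String) (out : String) : Decidable (Spec_calculate_love_score name1 name2 out) := by unfold Spec_calculate_love_score; infer_instance

-- ===== CLAIM (what is proved, stated in full; the proofs are below) =====
def Claim_equal_calculate_love_score : Prop := ∀ (name1 : String) (name2 : String), Dom_calculate_love_score name1 name2 → Spec_calculate_love_score name1 name2 (calculate_love_score name1 name2)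

-- ===== LEMMAS AND PROOFS =====

-- a single-character pattern: count.go counts the occurrences of that character
lemma countGo_singleton (c : Char) (l : List Char) (fuel acc : Nat) (h : l.length ≤ fuel) :
    PySem.Chars.count.go [c] fuel l acc = acc + l.count c := by
  induction l generalizing fuel acc with
  | nil => cases fuel <;> simp [PySem.Chars.count.go]
  | cons a t ih =>
      cases fuel with
      | zero => simp at h
      | succ f =>
          have hlen : t.length ≤ f := by simp at h; omega
          simp only [PySem.Chars.count.go, List.isPrefixOf, Bool.and_true]
          by_cases hac : c = a
          · subst hac
            simp [ih f (acc + 1) hlen, List.count_cons]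
            omega
          · simp [beq_iff_eq, hac, ih f acc hlen, Ne.symm hac]

lemma count_singleton (s : List Char) (c : Char) :
    PySem.Chars.count s [c] = s.count c := by
  have : PySem.Chars.count s [c] = PySem.Chars.count.go [c] s.length s 0 := rfl
  rw [this, countGo_singleton c s s.length 0 le_rfl]
  omega

-- [c] is a substring of l iff c is an element of l
lemma isIn_singleton (c : Char) (l : List Char) :
    PySem.Chars.isIn [c] l = l.contains c := by
  by_cases h : c ∈ l
  · rw [List.contains_eq_mem, decide_eq_true h]
    rw [PySem.Chars.isIn_iff_infix]
    obtain ⟨u, v, rfl⟩ := List.append_of_mem h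
    exact ⟨u, v, by simp⟩
  · rw [List.contains_eq_mem, decide_eq_false h]
    rw [PySem.Chars.isIn_eq_false_iff]
    intro hinf
    exact h (hinf.subset (by simp))

-- the paired fold computes the two countP's
lemma pair_fold (cs : List Char) (p q : Char → Bool) (a b : Int) :
    cs.foldl (fun (x : Int × Int) ch =>
        ((if p ch then x.1 + 1 else x.1), (if q ch then x.2 + 1 else x.2))) (a, b)
      = (a + (cs.countP p : Int), b + (cs.countP q : Int)) := by
  induction cs generalizing a b with
  | nil => simp
  | cons h t ih =>
      simp only [List.foldl_cons, List.countP_cons, ih]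
      by_cases hp : p h <;> by_cases hq : q h <;> simp [hp, hq, Prod.ext_iff] <;> omega

-- counting membership in four distinct characters = the four individual counts
lemma countP_four (cs : List Char) (c1 c2 c3 c4 : Char)
    (h12 : c1 ≠ c2) (h13 : c1 ≠ c3) (h14 : c1 ≠ c4) (h23 : c2 ≠ c3) (h24 : c2 ≠ c4) (h34 : c3 ≠ c4) :
    cs.countP (fun ch => ch == c1 || ch == c2 || ch == c3 || ch == c4)
      = cs.count c1 + cs.count c2 + cs.count c3 + cs.count c4 := by
  induction cs with
  | nil => simp
  | cons a t ih =>
      simp only [List.countP_cons, List.count_cons, ih]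
      by_cases h1 : a = c1 <;> by_cases h2 : a = c2 <;> by_cases h3 : a = c3 <;> by_cases h4 : a = c4 <;>
        simp_all [beq_iff_eq] <;> omega

-- ===== VERDICT (by name: the statement is the Claim_ definition above) =====
theorem calculate_love_score_spec : Claim_equal_calculate_love_score := by
  intro name1 name2 _
  unfold Spec_calculate_love_score calculate_love_score calculate_love_score_alt
  simp only [PySem.Str.count_eq, PySem.Str.isIn_eq]
  simp only [String.toList_singleton, count_singleton, isIn_singleton]
  have htrue : ("true".toList) = ['t','r','u','e'] := rfl
  have hlove : ("love".toList) = ['l','o','v','e'] := rfl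
  rw [htrue, hlove]
  set cs := (name1 ++ name2).toList with hcs
  simp only [List.foldl_cons, List.foldl_nil]
  rw [show (fun (p : Int × Int) ch =>
      ((if (['t','r','u','e'].contains ch) = true then p.1 + 1 else p.1),
       (if (['l','o','v','e'].contains ch) = true then p.2 + 1 else p.2)))
    = (fun (p : Int × Int) ch =>
      ((if (ch == 't' || ch == 'r' || ch == 'u' || ch == 'e') then p.1 + 1 else p.1),
       (if (ch == 'l' || ch == 'o' || ch == 'v' || ch == 'e') then p.2 + 1 else p.2))) by
      funext p ch; simp [or_assoc]]
  rw [pair_fold]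
  rw [countP_four cs 't' 'r' 'u' 'e' (by decide) (by decide) (by decide) (by decide) (by decide) (by decide)]
  rw [countP_four cs 'l' 'o' 'v' 'e' (by decide) (by decide) (by decide) (by decide) (by decide) (by decide)]
  push_cast
  ring_nf
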